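-- pv_equiv track=rewrite | github.com/ingorelovo/vkbot | functions.py | getLastName
-- ===== SOURCE A (Python) =====
-- def getLastName(text):
--     result = ""
--     probelFlag = 0
--     for i in text:
--         if i == ' ':
--             probelFlag = 1
--             continue
--         if i != ' ' and probelFlag == 0:
--             continue
--         if i != ' ' and probelFlag == 1:
--             result += i
--             continue
--     return result
-- ===== SOURCE B (Python) =====
-- def getLastName(text):
--     parts = text.split(' ')
--     return ''.join(parts[1:])
-- ===== Notes on version B (the rewrite author's own statement) =====
-- stated objective: idiomatic
-- what changed: Replaces the per-character loop with a seen-a-space flag and repeated string concatenation by tokenizing on the space separator and joining all tokens after the first.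
import Mathlib
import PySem

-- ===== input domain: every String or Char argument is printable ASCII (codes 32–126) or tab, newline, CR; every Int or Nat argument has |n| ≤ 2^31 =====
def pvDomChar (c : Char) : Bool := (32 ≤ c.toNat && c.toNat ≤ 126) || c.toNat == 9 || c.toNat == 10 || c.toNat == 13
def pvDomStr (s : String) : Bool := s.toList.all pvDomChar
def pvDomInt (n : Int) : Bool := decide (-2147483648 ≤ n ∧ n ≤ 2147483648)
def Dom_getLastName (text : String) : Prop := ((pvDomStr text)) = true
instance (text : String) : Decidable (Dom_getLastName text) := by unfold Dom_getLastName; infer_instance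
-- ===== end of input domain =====

-- B replaces A's per-character flag loop by split(' ') then joining the tokens after the first (more idiomatic).


-- ===== PORT A =====
-- result accumulated as List Char (Python's result += i), flag as Nat 0/1
-- the loop body: the three 'if … continue' branches in order
def stepA (st : List Char × Nat) (i : Char) : List Char × Nat :=
  if i == ' ' then (st.1, 1)
  else if i != ' ' && st.2 == 0 then st
  else if i != ' ' && st.2 == 1 then (st.1 ++ [i], st.2)
  else st

def getLastName (text : String) : String :=
  let st := text.toList.foldl stepA ([], 0)
  String.ofList st.1

-- ===== PORT B =====
def getLastName_alt (text : String) : String :=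
  let parts := (PySem.Str.split? text " ").getD []
  PySem.Str.join "" (PySem.List.slice parts (some 1) none)

-- ===== PRECONDITION & SPEC =====
def Spec_getLastName (text : String) (out : String) : Prop := out = getLastName_alt text
instance (text : String) (out : String) : Decidable (Spec_getLastName text out) := by unfold Spec_getLastName; infer_instance

-- ===== CLAIM (what is proved, stated in full; the proofs are below) =====
def Claim_equal_getLastName : Prop := ∀ (text : String), Dom_getLastName text → Spec_getLastName text (getLastName text)

-- ===== LEMMAS AND PROOFS =====

-- clean recursion computing Chars.splitOn.go's result for a one-char separator
def mySplit : List Char → List Char → List (List Char)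
  | [], cur => [cur.reverse]
  | c :: rest, cur => if c = ' ' then cur.reverse :: mySplit rest [] else mySplit rest (c :: cur)

-- intended result of A: the non-space characters after the first space
def collectA : List Char → List Char
  | [] => []
  | c :: rest => if c = ' ' then rest.filter (· ≠ ' ') else collectA rest

theorem go_eq_mySplit (fuel : Nat) : ∀ (l cur : List Char) (acc : List (List Char)),
    l.length ≤ fuel →
    PySem.Chars.splitOn.go [' '] fuel l cur acc = acc.reverse ++ mySplit l cur := by
  induction fuel with
  | zero =>
    intro l cur acc h
    have : l = [] := List.eq_nil_of_length_eq_zero (Nat.le_zero.mp h)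
    subst this
    simp [PySem.Chars.splitOn.go, mySplit]
  | succ n ih =>
    intro l cur acc h
    cases l with
    | nil => simp [PySem.Chars.splitOn.go, mySplit]
    | cons c rest =>
      by_cases hc : c = ' '
      · subst hc
        rw [show PySem.Chars.splitOn.go [' '] (n+1) (' ' :: rest) cur acc
              = PySem.Chars.splitOn.go [' '] n rest [] (cur.reverse :: acc) by
            simp [PySem.Chars.splitOn.go]]
        rw [ih rest [] (cur.reverse :: acc) (by simpa using Nat.lt_succ_iff.mp h)]
        simp [mySplit]
      · rw [show PySem.Chars.splitOn.go [' '] (n+1) (c :: rest) cur acc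
              = PySem.Chars.splitOn.go [' '] n rest (c :: cur) acc by
            simp only [PySem.Chars.splitOn.go, List.isPrefixOf]
            rw [if_neg]
            simp [beq_iff_eq]
            intro h
            exact absurd h.symm hc]
        rw [ih rest (c :: cur) acc (by simpa using Nat.lt_succ_iff.mp h)]
        simp only [mySplit, if_neg hc]

theorem splitOn_eq_mySplit (cs : List Char) :
    PySem.Chars.splitOn cs [' '] = mySplit cs [] := by
  rw [PySem.Chars.splitOn, go_eq_mySplit (cs.length + 1) cs [] [] (by omega)]
  simp

theorem join_nil_eq_flatten (l : List (List Char)) :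
    PySem.Chars.join [] l = l.flatten := by
  induction l with
  | nil => simp [PySem.Chars.join, List.intercalate]
  | cons a t ih =>
    cases t with
    | nil => simp [PySem.Chars.join, List.intercalate]
    | cons b t' =>
      simp only [PySem.Chars.join, List.intercalate] at *
      simp [List.intersperse] at ih ⊢
      simpa using ih

theorem flatten_mySplit (cs : List Char) : ∀ cur : List Char,
    (mySplit cs cur).flatten = cur.reverse ++ cs.filter (· ≠ ' ') := by
  induction cs with
  | nil => intro cur; simp [mySplit]
  | cons c rest ih =>
    intro cur
    by_cases hc : c = ' '
    · subst hc; simp [mySplit, ih]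
    · simp [mySplit, hc, ih]

theorem tail_mySplit (cs : List Char) : ∀ cur : List Char,
    (mySplit cs cur).tail.flatten = collectA cs := by
  induction cs with
  | nil => intro cur; simp [mySplit, collectA]
  | cons c rest ih =>
    intro cur
    by_cases hc : c = ' '
    · subst hc; simp [mySplit, collectA, flatten_mySplit]
    · simp [mySplit, collectA, hc, ih]

theorem stepA_space (st : List Char × Nat) : stepA st ' ' = (st.1, 1) := by
  simp [stepA]

theorem stepA_ns0 (r : List Char) (c : Char) (hc : c ≠ ' ') : stepA (r, 0) c = (r, 0) := by
  simp [stepA, hc]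

theorem stepA_ns1 (r : List Char) (c : Char) (hc : c ≠ ' ') : stepA (r, 1) c = (r ++ [c], 1) := by
  simp [stepA, hc]

-- A's fold once the flag is 1 appends every non-space character
theorem foldA_flag1 (cs : List Char) : ∀ res : List Char,
    cs.foldl stepA (res, 1) = (res ++ cs.filter (· ≠ ' '), 1) := by
  induction cs with
  | nil => intro res; simp
  | cons c rest ih =>
    intro res
    by_cases hc : c = ' '
    · subst hc
      rw [List.foldl_cons, stepA_space, ih]
      simp
    · rw [List.foldl_cons, stepA_ns1 res c hc, ih]
      simp [hc]

theorem foldA_flag0 (cs : List Char) :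
    (cs.foldl stepA ([], 0)).1 = collectA cs := by
  induction cs with
  | nil => simp [collectA]
  | cons c rest ih =>
    by_cases hc : c = ' '
    · subst hc
      rw [List.foldl_cons, stepA_space, foldA_flag1]
      simp [collectA]
    · rw [List.foldl_cons, stepA_ns0 [] c hc]
      simp [collectA, hc, ih]

-- ===== VERDICT (by name: the statement is the Claim_ definition above) =====
theorem getLastName_spec : Claim_equal_getLastName := by
  intro text _
  unfold Spec_getLastName getLastName getLastName_alt
  have hsp : " ".toList = [' '] := rfl
  have hemp : "".toList = ([] : List Char) := rfl
  simp only [PySem.Str.split?, PySem.Chars.split?, PySem.Str.join, hsp, hemp,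
    List.isEmpty_cons, Option.map_some, Option.getD_some, if_false, Bool.false_eq_true]
  rw [splitOn_eq_mySplit]
  rw [PySem.List.slice_from_one]
  congr 1
  rw [← List.map_tail, List.map_map]
  simp only [Function.comp_def, String.toList_ofList, List.map_id_fun', id]
  rw [join_nil_eq_flatten, tail_mySplit, foldA_flag0]
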